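-- pv_equiv track=rewrite | github.com/michaelconst/csuf-pythonprog | mod4/sockets/udp/tic_tac_toe.py | _get_empty
-- ===== SOURCE A (Python) =====
-- def _get_empty(board):
--     count = 0
--     pos = None
--     for i in range(3):
--         for j in range(3):
--             if board[i][j] == 0:
--                 count += 1
--                 if count > 1:
--                     return count, None
--                 if pos is None:
--                     pos = (i, j)
--     return count, pos
-- ===== SOURCE B (Python) =====
-- def _get_empty(board):
--     cells = [board[i][j] for i in range(3) for j in range(3)]
--     count = cells.count(0)
--     if count == 0:
--         return 0, None
--     if count > 1:
--         return 2, None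
--     k = cells.index(0)
--     return 1, (k // 3, k % 3)
-- ===== Notes on version B (the rewrite author's own statement) =====
-- stated objective: alternative
-- what changed: Replaces the single lazy scan with a (count,pos) accumulator and early return by three staged passes: eagerly materialize the 9 cells, count the zeros, and only if the count is exactly 1 compute the position from the linear index via divmod arithmetic.
-- outside the precondition, e.g. on _get_empty([[0, 0, 0]]): A returns (2, None), B raises IndexError
import Mathlib
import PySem

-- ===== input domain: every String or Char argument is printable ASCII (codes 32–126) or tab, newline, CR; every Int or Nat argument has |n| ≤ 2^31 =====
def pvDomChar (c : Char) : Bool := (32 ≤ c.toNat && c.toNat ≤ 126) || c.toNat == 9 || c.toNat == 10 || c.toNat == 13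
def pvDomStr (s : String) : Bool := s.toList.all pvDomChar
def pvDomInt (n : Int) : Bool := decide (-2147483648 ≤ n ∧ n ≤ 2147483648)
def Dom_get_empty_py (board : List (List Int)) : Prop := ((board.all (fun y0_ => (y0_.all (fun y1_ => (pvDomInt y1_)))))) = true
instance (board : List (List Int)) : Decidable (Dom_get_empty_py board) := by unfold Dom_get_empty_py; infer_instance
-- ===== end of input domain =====

-- B replaces A's single lazy scan with a (count, pos) accumulator and early return by three
-- staged eager passes: materialize the 9 cells, count the zeros, and, only when the count is
-- exactly 1, recover the position from the linear index by divmod; return values only.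

-- ===== PORT A =====
-- A's nested 'for i in range(3): for j in range(3):' loop, flattened into one recursion
-- over the row-major index pairs, carrying A's (count, pos) state; early return on count > 1.
def pvA_cell (board : List (List Int)) (i j : Int) : Option Int :=
  (PySem.List.pyGet? board i).bind (fun row => PySem.List.pyGet? row j)

def pvA_loop (board : List (List Int)) : List (Int × Int) → Int → Option (Int × Int) → Int × (Option (Int × Int))
  | [], count, pos => (count, pos)
  | (i, j) :: rest, count, pos =>
    if pvA_cell board i j = some 0 then
      let count := count + 1
      if count > 1 then (count, none)
      else pvA_loop board rest count (if pos.isNone then some (i, j) else pos)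
    else pvA_loop board rest count pos

def get_empty_py (board : List (List Int)) : Int × (Option (Int × Int)) :=
  pvA_loop board ((PySem.List.pyRange 0 3 1).flatMap (fun i => (PySem.List.pyRange 0 3 1).map (fun j => (i, j)))) 0 none

-- ===== PORT B =====
-- B's eager comprehension '[board[i][j] for i in range(3) for j in range(3)]', with the
-- cell lookup kept Option-valued (none = IndexError); exact wherever every lookup succeeds,
-- i.e. on all of Pre_ (outside Pre_ the Python B raises).
def pvB_cells (board : List (List Int)) : List (Option Int) :=
  (PySem.List.pyRange 0 3 1).flatMap (fun i =>
    (PySem.List.pyRange 0 3 1).map (fun j =>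
      (PySem.List.pyGet? board i).bind (fun row => PySem.List.pyGet? row j)))

def get_empty_py_alt (board : List (List Int)) : Int × (Option (Int × Int)) :=
  let cells := pvB_cells board
  let count : Int := (PySem.List.count cells (some 0) : Int)
  if count = 0 then (0, none)
  else if count > 1 then (2, none)
  else
    match PySem.List.index? cells (some 0) with
    | some k => (1, some ((PySem.Int.floordiv (k : Int) 3), PySem.Int.mod (k : Int) 3))
    | none => (1, none)  -- unreachable: count = 1 puts a zero in cells (Python .index would raise)

-- ===== PRECONDITION & SPEC =====
-- Pre_ excludes boards with fewer than 3 rows or a row shorter than 3 among the first three: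
-- there Python A usually raises IndexError, and when two zeros precede the first missing cell
-- A still returns (2, None) while B's eager comprehension raises IndexError (see cites).
def Pre_get_empty_py (board : List (List Int)) : Prop :=
  3 ≤ board.length ∧ ∀ row ∈ board.take 3, 3 ≤ row.length
instance (board : List (List Int)) : Decidable (Pre_get_empty_py board) := by unfold Pre_get_empty_py; infer_instance

def pvWitness_get_empty_py : List (List Int) := [[1, 0, 2], [3, 4, 5], [6, 0, 7]]

def Spec_get_empty_py (board : List (List Int)) (out : Int × (Option (Int × Int))) : Prop := out = get_empty_py_alt board
instance (board : List (List Int)) (out : Int × (Option (Int × Int))) : Decidable (Spec_get_empty_py board out) := by unfold Spec_get_empty_py; infer_instance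

-- ===== CLAIM (what is proved, stated in full; the proofs are below) =====
def Claim_equal_get_empty_py : Prop := ∀ (board : List (List Int)), Dom_get_empty_py board → Pre_get_empty_py board → Spec_get_empty_py board (get_empty_py board)

-- ===== LEMMAS AND PROOFS =====

-- the row-major coordinate stream both ports walk
def pvCoords : List (Int × Int) :=
  (PySem.List.pyRange 0 3 1).flatMap (fun i => (PySem.List.pyRange 0 3 1).map (fun j => (i, j)))

theorem pvB_cells_eq_map (board : List (List Int)) :
    pvB_cells board = pvCoords.map (fun p => pvA_cell board p.1 p.2) := rfl

-- With count already 1 and a position held, the rest of A's scan returns (1, pos)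
-- iff no further cell in the stream is zero, else (2, none).
theorem pvA_loop_one (board : List (List Int)) (L : List (Int × Int)) (p : Int × Int) :
    pvA_loop board L 1 (some p) =
      if (L.map (fun q => pvA_cell board q.1 q.2)).count (some 0) = 0 then (1, some p)
      else (2, none) := by
  induction L with
  | nil => rfl
  | cons ij rest ih =>
    obtain ⟨i, j⟩ := ij
    by_cases h : pvA_cell board i j = some 0
    · simp [pvA_loop, h]
    · simp [pvA_loop, h, ih]

-- From A's initial state the scan computes exactly B's count/first-index dispatch,
-- with the position read off the coordinate stream at the first index.
theorem pvA_loop_zero (board : List (List Int)) (L : List (Int × Int)) :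
    pvA_loop board L 0 none =
      (let cs := L.map (fun q => pvA_cell board q.1 q.2)
       if cs.count (some 0) = 0 then (0, none)
       else if 1 < cs.count (some 0) then (2, none)
       else (1, (PySem.List.index? cs (some 0)).bind (fun k => L[k]?))) := by
  induction L with
  | nil => rfl
  | cons ij rest ih =>
    obtain ⟨i, j⟩ := ij
    by_cases h : pvA_cell board i j = some 0
    · simp only [pvA_loop]
      rw [if_pos h]
      norm_num
      rw [pvA_loop_one]
      simp only [List.count_cons, h, BEq.rfl, if_pos]
      by_cases h0 : (rest.map (fun q => pvA_cell board q.1 q.2)).count (some 0) = 0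
      · simp [h0, List.idxOf?_cons]
      · have h1 : 1 < (rest.map (fun q => pvA_cell board q.1 q.2)).count (some 0) + 1 := by omega
        simp [h0, h1]
    · simp only [pvA_loop]
      rw [if_neg h, ih]
      simp only [List.map_cons, List.count_cons]
      rw [PySem.List.index?_cons_of_ne _ h]
      have hb : (pvA_cell board i j == some 0) = false := by simpa using h
      simp only [hb]
      cases hI : PySem.List.index? (rest.map (fun q => pvA_cell board q.1 q.2)) (some 0) <;>
        simp

-- ===== VERDICT (by name: the statement is the Claim_ definition above) =====
theorem get_empty_py_spec : Claim_equal_get_empty_py := by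
  intro board _ _
  show get_empty_py board = get_empty_py_alt board
  rw [get_empty_py, get_empty_py_alt]
  rw [show ((PySem.List.pyRange 0 3 1).flatMap (fun i => (PySem.List.pyRange 0 3 1).map (fun j => (i, j)))) = pvCoords from rfl]
  rw [pvA_loop_zero, pvB_cells_eq_map]
  set cs := pvCoords.map (fun p => pvA_cell board p.1 p.2) with hcs
  show _ = (if ((cs.count (some 0) : Int)) = 0 then ((0 : Int), (none : Option (Int × Int)))
    else if ((cs.count (some 0) : Int)) > 1 then (2, none)
    else match PySem.List.index? cs (some 0) with
      | some k => (1, some ((PySem.Int.floordiv (k : Int) 3), PySem.Int.mod (k : Int) 3))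
      | none => (1, none))
  by_cases h0 : cs.count (some 0) = 0
  · rw [if_pos h0, if_pos (by exact_mod_cast congrArg Nat.cast h0)]
  · by_cases h1 : 1 < cs.count (some 0)
    · rw [if_neg h0, if_pos h1, if_neg (by exact_mod_cast h0), if_pos (by exact_mod_cast h1)]
    · have hc1 : cs.count (some 0) = 1 := by omega
      have hmem : (some 0) ∈ cs := by
        by_contra hm
        exact h0 (List.count_eq_zero_of_not_mem hm)
      obtain ⟨k, hk⟩ := Option.isSome_iff_exists.1
        ((PySem.List.index?_isSome_iff (xs := cs) (v := some 0)).2 hmem)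
      have hklt : k < cs.length := (PySem.List.getElem_of_index?_eq_some hk).1
      have hlen : cs.length = 9 := by rw [hcs]; rfl
      rw [if_neg h0, if_neg (by omega), if_neg (by exact_mod_cast h0),
        if_neg (by exact_mod_cast (by omega : ¬ 1 < cs.count (some 0))), hk]
      rw [hlen] at hklt
      simp only [Option.bind_some]
      interval_cases k <;> decide
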